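-- pv_equiv track=rewrite | github.com/RafaelAZV/Evolutionary-Computing | N-Queens/nqueens.py | check_genotipes
-- ===== SOURCE A (Python) =====
-- def check_genotipes(child, parent, child_inherited, start, end, size):
--
-- 	current_parent_position = 0
-- 	fixed_position = list(range(start, end + 1))
-- 	i = 0
-- 	while i < size:
--
-- 		if i in fixed_position:
-- 			i += 1
-- 			continue
--
-- 		check_child = child[i]
-- 		if check_child == -1: #to be filled
--
-- 			parent_trait = parent[current_parent_position]
-- 			while parent_trait in child_inherited:
--
-- 				current_parent_position += 1
-- 				parent_trait = parent[current_parent_position]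
--
-- 			child[i] = parent_trait
-- 			child_inherited.append(parent_trait)
--
-- 		i +=1
--
-- 	return child
-- ===== SOURCE B (Python) =====
-- def check_genotipes(child, parent, child_inherited, start, end, size):
--     # pass 1: collect, in parent order, values not yet seen (seen = inherited + collected)
--     seen = set(child_inherited)
--     fill = []
--     for v in parent:
--         if v not in seen:
--             fill.append(v)
--             seen.add(v)
--     # pass 2: assign collected values to the empty (non-fixed) slots
--     pos = 0
--     for i in range(size):
--         if start <= i <= end:
--             continue
--         if child[i] == -1:
--             child[i] = fill[pos]
--             child_inherited.append(fill[pos])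
--             pos += 1
--     return child
-- ===== Notes on version B (the rewrite author's own statement) =====
-- stated objective: alternative
-- what changed: A interleaves an advancing parent-pointer scan (skipping values already in child_inherited) inside the fill loop; B first precomputes, in one pass over parent with a growing seen set, the ordered list of values to insert, then runs a separate indexed fill pass over the child with a direct start<=i<=end comparison instead of A's range-list membership test.
import Mathlib
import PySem

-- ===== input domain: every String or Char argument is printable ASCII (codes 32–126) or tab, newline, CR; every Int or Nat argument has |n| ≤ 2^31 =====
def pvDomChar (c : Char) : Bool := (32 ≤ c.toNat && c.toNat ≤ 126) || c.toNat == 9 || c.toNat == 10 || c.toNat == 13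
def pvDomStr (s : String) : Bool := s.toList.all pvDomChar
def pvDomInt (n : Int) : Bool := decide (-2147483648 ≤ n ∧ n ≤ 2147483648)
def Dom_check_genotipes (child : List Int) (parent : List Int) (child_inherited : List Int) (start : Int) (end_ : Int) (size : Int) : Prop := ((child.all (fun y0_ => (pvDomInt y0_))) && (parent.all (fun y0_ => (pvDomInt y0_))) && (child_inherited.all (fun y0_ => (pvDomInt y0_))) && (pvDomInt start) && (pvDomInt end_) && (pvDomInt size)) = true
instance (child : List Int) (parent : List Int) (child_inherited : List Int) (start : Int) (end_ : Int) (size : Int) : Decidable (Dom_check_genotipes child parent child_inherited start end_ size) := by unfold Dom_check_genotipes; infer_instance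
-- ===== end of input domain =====

-- B precomputes the ordered list of values to insert in one pass, then fills indexed slots in a
-- second pass (A interleaves a parent-pointer scan inside the fill loop).  Both Pythons mutate
-- child and child_inherited in place identically; the equivalence proved is about the return value.

-- ===== PORT A =====
-- a successful pyGet? at a Nat index means the index is in range (used for termination)
theorem pvGet_nat_lt (xs : List Int) (n : Nat) (v : Int)
    (h : PySem.List.pyGet? xs (n : Int) = some v) : n < xs.length := by
  by_contra hc
  rw [PySem.List.pyGet?_natCast, List.getElem?_eq_none (by omega)] at h
  simp at h

-- A's inner 'while parent_trait in child_inherited' scan from index cpp; none = IndexError.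
def pvScanA (parent : List Int) (inh : List Int) (cpp : Nat) : Option (Int × Nat) :=
  match h : PySem.List.pyGet? parent (cpp : Int) with
  | none => none
  | some v => if v ∈ inh then pvScanA parent inh (cpp + 1) else some (v, cpp)
termination_by parent.length - cpp
decreasing_by
  have hlt : cpp < parent.length := pvGet_nat_lt parent cpp v h
  omega

-- A's outer 'while i < size' loop; early 'child' returns model Python's IndexError points.
def pvLoopA (parent : List Int) (fixed : List Int) (size : Int) (i : Int) (cpp : Nat)
    (child : List Int) (inh : List Int) : List Int :=
  if h : i < size then
    if i ∈ fixed then pvLoopA parent fixed size (i + 1) cpp child inh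
    else
      match PySem.List.pyGet? child i with
      | none => child
      | some c =>
        if c = -1 then
          match pvScanA parent inh cpp with
          | none => child
          | some (v, p) =>
              pvLoopA parent fixed size (i + 1) p (child.set i.toNat v) (inh ++ [v])
        else pvLoopA parent fixed size (i + 1) cpp child inh
  else child
termination_by (size - i).toNat
decreasing_by all_goals omega

def check_genotipes (child : List Int) (parent : List Int) (child_inherited : List Int) (start : Int) (end_ : Int) (size : Int) : List Int :=
  pvLoopA parent (PySem.List.pyRange start (end_ + 1) 1) size 0 0 child child_inherited

-- ===== PORT B =====
-- pass 1 of Source B: one fold over parent keeping (seen : set, fill : list).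
def pvFillStep (sf : PySem.Set Int × List Int) (v : Int) : PySem.Set Int × List Int :=
  if v ∈ sf.1 then sf else (PySem.Set.add sf.1 v, sf.2 ++ [v])

def pvFillB (child_inherited : List Int) (parent : List Int) : List Int :=
  (parent.foldl pvFillStep (PySem.Set.ofList child_inherited, ([] : List Int))).2

-- pass 2 of Source B: the body of 'for i in range(size)' with state (child, pos).
def pvStepB (start : Int) (end_ : Int) (fill : List Int) (st : List Int × Nat) (i : Int) : List Int × Nat :=
  if start ≤ i ∧ i ≤ end_ then st
  else
    match PySem.List.pyGet? st.1 i with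
    | none => st
    | some c =>
      if c = -1 then
        match PySem.List.pyGet? fill (st.2 : Int) with
        | none => st
        | some v => (st.1.set i.toNat v, st.2 + 1)
      else st

def check_genotipes_alt (child : List Int) (parent : List Int) (child_inherited : List Int) (start : Int) (end_ : Int) (size : Int) : List Int :=
  ((PySem.List.pyRange 0 size 1).foldl (pvStepB start end_ (pvFillB child_inherited parent)) (child, 0)).1

-- ===== PRECONDITION & SPEC =====
-- Pre_ excludes exactly the inputs on which the Python A raises IndexError: a non-fixed index
-- reaching past child, or more empty slots than distinct parent values not already inherited.
def Pre_check_genotipes (child : List Int) (parent : List Int) (child_inherited : List Int) (start : Int) (end_ : Int) (size : Int) : Prop :=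
  (size ≤ (child.length : Int) ∨ (start ≤ (child.length : Int) ∧ size ≤ end_ + 1)) ∧
  ((PySem.List.pyRange 0 size 1).filter
      (fun i => (!(decide (start ≤ i) && decide (i ≤ end_))) &&
                (PySem.List.pyGet? child i == some (-1)))).length
    ≤ ((PySem.List.dedup parent).filter (fun v => !(child_inherited.contains v))).length

instance (child : List Int) (parent : List Int) (child_inherited : List Int) (start : Int) (end_ : Int) (size : Int) : Decidable (Pre_check_genotipes child parent child_inherited start end_ size) := by unfold Pre_check_genotipes; infer_instance

def pvWitness_check_genotipes : List Int × List Int × List Int × Int × Int × Int :=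
  ([-1, 5, -1], [3, 5, 3, 7], [5], 1, 1, 3)

def Spec_check_genotipes (child : List Int) (parent : List Int) (child_inherited : List Int) (start : Int) (end_ : Int) (size : Int) (out : List Int) : Prop := out = check_genotipes_alt child parent child_inherited start end_ size
instance (child : List Int) (parent : List Int) (child_inherited : List Int) (start : Int) (end_ : Int) (size : Int) (out : List Int) : Decidable (Spec_check_genotipes child parent child_inherited start end_ size out) := by unfold Spec_check_genotipes; infer_instance

-- ===== CLAIM (what is proved, stated in full; the proofs are below) =====
def Claim_equal_check_genotipes : Prop := ∀ (child : List Int) (parent : List Int) (child_inherited : List Int) (start : Int) (end_ : Int) (size : Int), Dom_check_genotipes child parent child_inherited start end_ size → Pre_check_genotipes child parent child_inherited start end_ size → Spec_check_genotipes child parent child_inherited start end_ size (check_genotipes child parent child_inherited start end_ size)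

-- ===== LEMMAS AND PROOFS =====

theorem pvScanA_sound (parent inh : List Int) (cpp : Nat) (v : Int) (p : Nat)
    (h : pvScanA parent inh cpp = some (v, p)) :
    PySem.List.pyGet? parent (p : Int) = some v ∧ v ∉ inh ∧ cpp ≤ p ∧ p < parent.length := by
  induction cpp using pvScanA.induct (parent := parent) (inh := inh) with
  | case1 cpp hg =>
      rw [pvScanA, hg] at h; simp at h
  | case2 cpp v' hg hm ih =>
      rw [pvScanA, hg] at h
      simp only [if_pos hm] at h
      have := ih h
      exact ⟨this.1, this.2.1, by omega, this.2.2.2⟩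
  | case3 cpp v' hg hm =>
      rw [pvScanA, hg] at h
      simp only [if_neg hm, Option.some.injEq, Prod.mk.injEq] at h
      obtain ⟨rfl, rfl⟩ := h
      exact ⟨hg, hm, le_rfl, pvGet_nat_lt _ _ _ hg⟩

-- the ordered list of values A's scan would successively produce, starting at cpp
def pvFillFrom (parent : List Int) (inh : List Int) (cpp : Nat) : List Int :=
  match h : pvScanA parent inh cpp with
  | none => []
  | some (v, p) => v :: pvFillFrom parent (inh ++ [v]) (p + 1)
termination_by parent.length - cpp
decreasing_by
  have := pvScanA_sound parent inh cpp v p h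
  omega

theorem pvFillFrom_eq (parent inh : List Int) (cpp : Nat) :
    pvFillFrom parent inh cpp =
      match pvScanA parent inh cpp with
      | none => []
      | some (v, p) => v :: pvFillFrom parent (inh ++ [v]) (p + 1) := by
  rw [pvFillFrom]
  split <;> rename_i heq <;> rw [heq]

theorem pvScanA_none (parent inh : List Int) (cpp : Nat) (h : parent.length ≤ cpp) :
    pvScanA parent inh cpp = none := by
  rw [pvScanA, PySem.List.pyGet?_natCast, List.getElem?_eq_none (by omega)]

theorem pvScanA_skip (parent inh : List Int) (cpp : Nat) (v : Int)
    (hv : PySem.List.pyGet? parent (cpp : Int) = some v) (hm : v ∈ inh) :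
    pvScanA parent inh cpp = pvScanA parent inh (cpp + 1) := by
  conv_lhs => rw [pvScanA, hv]
  exact if_pos hm

theorem pvScanA_found (parent inh : List Int) (cpp : Nat) (v : Int)
    (hv : PySem.List.pyGet? parent (cpp : Int) = some v) (hm : v ∉ inh) :
    pvScanA parent inh cpp = some (v, cpp) := by
  conv_lhs => rw [pvScanA, hv]
  exact if_neg hm

theorem pvFillFrom_congr (parent inh : List Int) (c1 c2 : Nat)
    (h : pvScanA parent inh c1 = pvScanA parent inh c2) :
    pvFillFrom parent inh c1 = pvFillFrom parent inh c2 := by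
  rw [pvFillFrom_eq, pvFillFrom_eq, h]

-- pass 1 of B computes pvFillFrom (the seen set tracks the scan's inherited list by membership)
theorem pvFillB_eq (parent : List Int) : ∀ (k cpp : Nat), parent.length - cpp ≤ k →
    ∀ (s : PySem.Set Int) (t f : List Int), (∀ x : Int, x ∈ s ↔ x ∈ t) →
    ((parent.drop cpp).foldl pvFillStep (s, f)).2 = f ++ pvFillFrom parent t cpp := by
  intro k
  induction k with
  | zero =>
      intro cpp hk s t f hst
      rw [List.drop_eq_nil_of_le (by omega), pvFillFrom_eq, pvScanA_none parent t cpp (by omega)]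
      simp
  | succ k ih =>
      intro cpp hk s t f hst
      by_cases hlt : cpp < parent.length
      · have hdrop : parent.drop cpp = parent[cpp] :: parent.drop (cpp + 1) :=
          List.drop_eq_getElem_cons hlt
        have hget : PySem.List.pyGet? parent (cpp : Int) = some parent[cpp] := by
          rw [PySem.List.pyGet?_natCast]; exact List.getElem?_eq_getElem hlt
        rw [hdrop, List.foldl_cons]
        by_cases hm : parent[cpp] ∈ s
        · have hstep : pvFillStep (s, f) parent[cpp] = (s, f) := if_pos hm
          rw [hstep, ih (cpp + 1) (by omega) s t f hst,
            pvFillFrom_congr parent t cpp (cpp + 1)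
              (pvScanA_skip _ _ _ _ hget ((hst _).mp hm))]
        · have hstep : pvFillStep (s, f) parent[cpp]
              = (PySem.Set.add s parent[cpp], f ++ [parent[cpp]]) := if_neg hm
          rw [hstep, ih (cpp + 1) (by omega) _ (t ++ [parent[cpp]]) _
              (fun x => by simp [PySem.Set.mem_add, hst x]),
            pvFillFrom_eq parent t cpp,
            pvScanA_found _ _ _ _ hget (fun hc => hm ((hst _).mpr hc))]
          simp
      · rw [List.drop_eq_nil_of_le (by omega), pvFillFrom_eq, pvScanA_none parent t cpp (by omega)]
        simp

-- freeze lemmas for B's fold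
theorem pvFoldB_frozen (start end_ : Int) (fill : List Int) (child : List Int) (pos : Nat)
    (l : List Int) (hl : ∀ j ∈ l, (child.length : Int) ≤ j) :
    l.foldl (pvStepB start end_ fill) (child, pos) = (child, pos) := by
  induction l with
  | nil => rfl
  | cons j l ih =>
      have hj := hl j (List.mem_cons_self ..)
      have hstep : pvStepB start end_ fill (child, pos) j = (child, pos) := by
        unfold pvStepB
        split
        · rfl
        · have hg : PySem.List.pyGet? child j = none := by
            rw [PySem.List.pyGet?_eq_none_iff, PySem.Raise.InRange]
            omega
          rw [hg]
      rw [List.foldl_cons, hstep]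
      exact ih (fun j hj => hl j (List.mem_cons_of_mem _ hj))

theorem pvFoldB_nil_fill (start end_ : Int) (l : List Int) (st : List Int × Nat) :
    l.foldl (pvStepB start end_ []) st = st := by
  induction l generalizing st with
  | nil => rfl
  | cons j l ih =>
      have hnil : PySem.List.pyGet? ([] : List Int) ((st.2 : Nat) : Int) = none := by
        rw [PySem.List.pyGet?_eq_none_iff, PySem.Raise.InRange]
        simp
      have hstep : pvStepB start end_ [] st j = st := by
        unfold pvStepB
        split
        · rfl
        · cases hg : PySem.List.pyGet? st.1 j with
          | none => rfl
          | some c =>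
              simp only [hnil]
              split <;> rfl
      rw [List.foldl_cons, hstep, ih]

theorem pvFoldB_shift (start end_ : Int) (x : Int) (L : List Int) :
    ∀ (l : List Int) (child : List Int) (pos : Nat),
    l.foldl (pvStepB start end_ (x :: L)) (child, pos + 1)
      = ((l.foldl (pvStepB start end_ L) (child, pos)).1,
         (l.foldl (pvStepB start end_ L) (child, pos)).2 + 1) := by
  intro l
  induction l with
  | nil => intro child pos; rfl
  | cons j l ih =>
      intro child pos
      have hstep : pvStepB start end_ (x :: L) (child, pos + 1) j =
          ((pvStepB start end_ L (child, pos) j).1, (pvStepB start end_ L (child, pos) j).2 + 1) := by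
        unfold pvStepB
        have hcast : PySem.List.pyGet? (x :: L) (((pos + 1 : Nat)) : Int) = PySem.List.pyGet? L ((pos : Nat) : Int) := by
          rw [show (((pos + 1 : Nat)) : Int) = ((pos : Nat) : Int) + 1 by push_cast; ring,
            PySem.List.pyGet?_cons_succ]
        split
        · rfl
        · cases hg : PySem.List.pyGet? child j with
          | none => rfl
          | some c =>
              by_cases hc : c = -1
              · simp only [if_pos hc, hcast]
                cases hv : PySem.List.pyGet? L ((pos : Nat) : Int) with
                | none => rfl
                | some v => rfl
              · simp only [if_neg hc]
      rw [List.foldl_cons, List.foldl_cons, hstep]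
      cases he : pvStepB start end_ L (child, pos) j with
      | mk c2 p2 => exact ih c2 p2

-- the main correspondence between A's interleaved loop and B's fill-then-assign folds
theorem pvLoopA_eq_foldB (parent : List Int) (start end_ size : Int) :
    ∀ (k : Nat) (i : Int) (cpp : Nat) (child inh : List Int), 0 ≤ i → (size - i).toNat ≤ k →
    pvLoopA parent (PySem.List.pyRange start (end_ + 1) 1) size i cpp child inh
      = ((PySem.List.pyRange i size 1).foldl
           (pvStepB start end_ (pvFillFrom parent inh cpp)) (child, 0)).1 := by
  intro k
  induction k with
  | zero =>
      intro i cpp child inh h0 hk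
      rw [pvLoopA, dif_neg (by omega), PySem.List.pyRange_one_eq_nil (by omega)]
      rfl
  | succ k ih =>
      intro i cpp child inh h0 hk
      by_cases hi : i < size
      · rw [PySem.List.pyRange_one_cons hi, List.foldl_cons]
        by_cases hf : start ≤ i ∧ i ≤ end_
        · have hmem : i ∈ PySem.List.pyRange start (end_ + 1) 1 := by
            rw [PySem.List.mem_pyRange_one]; omega
          rw [pvLoopA, dif_pos hi, if_pos hmem]
          have hstep : pvStepB start end_ (pvFillFrom parent inh cpp) (child, 0) i = (child, 0) := by
            unfold pvStepB; rw [if_pos hf]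
          rw [hstep]
          exact ih (i + 1) cpp child inh (by omega) (by omega)
        · have hmem : i ∉ PySem.List.pyRange start (end_ + 1) 1 := by
            rw [PySem.List.mem_pyRange_one]; omega
          rw [pvLoopA, dif_pos hi, if_neg hmem]
          cases hg : PySem.List.pyGet? child i with
          | none =>
              have hlen : (child.length : Int) ≤ i := by
                rw [PySem.List.pyGet?_eq_none_iff, PySem.Raise.InRange] at hg
                omega
              have hstep : pvStepB start end_ (pvFillFrom parent inh cpp) (child, 0) i = (child, 0) := by
                unfold pvStepB; rw [if_neg hf, hg]
              rw [hstep, pvFoldB_frozen start end_ _ child 0 _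
                (fun j hj => by rw [PySem.List.mem_pyRange_one] at hj; omega)]
          | some c =>
              by_cases hc : c = -1
              · subst hc
                cases hscan : pvScanA parent inh cpp with
                | none =>
                    have hfillnil : pvFillFrom parent inh cpp = [] := by
                      rw [pvFillFrom_eq, hscan]
                    rw [hfillnil]
                    have hstep : pvStepB start end_ ([] : List Int) (child, 0) i = (child, 0) := by
                      unfold pvStepB
                      rw [if_neg hf, hg]
                      simp only []
                      rw [show PySem.List.pyGet? ([] : List Int) (((0 : Nat)) : Int) = none from by
                        rw [PySem.List.pyGet?_eq_none_iff, PySem.Raise.InRange]; simp]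
                      simp
                    rw [hstep, pvFoldB_nil_fill]
                    simp
                | some vp =>
                    obtain ⟨v, p⟩ := vp
                    obtain ⟨hpv, hpm, hcpp, hplen⟩ := pvScanA_sound parent inh cpp v p hscan
                    have hfill : pvFillFrom parent inh cpp = v :: pvFillFrom parent (inh ++ [v]) (p + 1) := by
                      rw [pvFillFrom_eq, hscan]
                    have hstep : pvStepB start end_ (pvFillFrom parent inh cpp) (child, 0) i
                        = (child.set i.toNat v, 1) := by
                      unfold pvStepB
                      rw [if_neg hf, hg]
                      simp only [hfill]
                      rw [show PySem.List.pyGet? (v :: pvFillFrom parent (inh ++ [v]) (p + 1)) (((0 : Nat)) : Int)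
                          = some v from PySem.List.pyGet?_zero_cons ..]
                      simp
                    have hcongr : pvFillFrom parent (inh ++ [v]) (p + 1) = pvFillFrom parent (inh ++ [v]) p := by
                      exact pvFillFrom_congr parent (inh ++ [v]) (p + 1) p
                        (pvScanA_skip parent (inh ++ [v]) p v hpv (by simp)).symm
                    rw [hstep, hfill, pvFoldB_shift, hcongr]
                    simp only [reduceIte]
                    exact ih (i + 1) p (child.set i.toNat v) (inh ++ [v]) (by omega) (by omega)
              · have hstep : pvStepB start end_ (pvFillFrom parent inh cpp) (child, 0) i = (child, 0) := by
                  unfold pvStepB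
                  rw [if_neg hf]
                  simp only [hg, if_neg hc]
                simp only [if_neg hc, hstep]
                exact ih (i + 1) cpp child inh (by omega) (by omega)
      · rw [pvLoopA, dif_neg hi, PySem.List.pyRange_one_eq_nil (by omega)]
        rfl

-- ===== VERDICT (by name: the statement is the Claim_ definition above) =====
theorem check_genotipes_spec : Claim_equal_check_genotipes := by
  intro child parent child_inherited start end_ size _dom _pre
  unfold Spec_check_genotipes check_genotipes check_genotipes_alt
  rw [pvLoopA_eq_foldB parent start end_ size (size - 0).toNat 0 0 child child_inherited le_rfl le_rfl]
  have hfill : pvFillB child_inherited parent = pvFillFrom parent child_inherited 0 := by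
    have := pvFillB_eq parent parent.length 0 (by omega)
      (PySem.Set.ofList child_inherited) child_inherited []
      (fun x => PySem.Set.mem_ofList ..)
    simpa [pvFillB] using this
  rw [hfill]
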